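-- pv_equiv track=rewrite | github.com/jerbarnes/semeval22_structured_sentiment | baselines/sequence_labeling/utils.py | get_offsets
-- ===== SOURCE A (Python) =====
-- def get_offsets(text):
--     offsets = {}
--     bidx = 0
--     eidx = 0
--     for i, token in enumerate(text.split()):
--         eidx = bidx + len(token)
--         offsets[i] = (bidx, eidx)
--         bidx = eidx + 1
--     return offsets
-- ===== SOURCE B (Python) =====
-- def get_offsets(text):
--     # Single character-level state machine over the raw text: no split(), no len();
--     # p is the position in the single-space-normalized text, start marks the open token.
--     offsets = {}
--     i = 0
--     p = 0
--     start = -1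
--     for ch in text:
--         if ch.isspace():
--             if start >= 0:
--                 offsets[i] = (start, p)
--                 i += 1
--                 p += 1
--                 start = -1
--         else:
--             if start < 0:
--                 start = p
--             p += 1
--     if start >= 0:
--         offsets[i] = (start, p)
--     return offsets
-- ===== Notes on version B (the rewrite author's own statement) =====
-- stated objective: alternative
-- what changed: B is a single character-level state machine over the raw text (no split(), no per-token len): it scans each character once, tracking the position in the single-space-normalized text and the open token's start, emitting a span at each token boundary; A splits into tokens first and accumulates len(token)+1 per token.
import Mathlib
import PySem

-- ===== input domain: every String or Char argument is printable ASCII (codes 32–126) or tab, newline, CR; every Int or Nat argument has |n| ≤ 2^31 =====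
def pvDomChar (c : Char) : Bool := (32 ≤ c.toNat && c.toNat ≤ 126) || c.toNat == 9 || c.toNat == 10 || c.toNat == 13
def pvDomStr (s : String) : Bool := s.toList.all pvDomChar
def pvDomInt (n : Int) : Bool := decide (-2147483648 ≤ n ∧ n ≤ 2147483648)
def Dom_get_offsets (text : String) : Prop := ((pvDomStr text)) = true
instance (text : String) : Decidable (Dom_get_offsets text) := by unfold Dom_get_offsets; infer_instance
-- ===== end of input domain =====

-- B replaces A's split()+length-accumulation loop by a single character-level state
-- machine over the raw text (no split, no len), tracking the normalized position.


-- ===== PORT A =====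
-- loop state: (offsets, bidx, eidx), exactly A's three mutated variables
def get_offsets (text : String) : List (Int × Int × Int) :=
  let step := fun (st : PySem.Dict Int (Int × Int) × Int × Int) (p : Int × String) =>
    let eidx := st.2.1 + PySem.Str.len p.2
    (st.1.insert p.1 (st.2.1, eidx), eidx + 1, eidx)
  (((PySem.List.enumerate (PySem.Str.split₀ text)).foldl step (PySem.Dict.empty, 0, 0)).1).items

-- ===== PORT B =====
-- loop state: (offsets, i, p, start), exactly B's four mutated variables
def get_offsets_alt (text : String) : List (Int × Int × Int) :=
  let fin := text.toList.foldl
    (fun (st : PySem.Dict Int (Int × Int) × Int × Int × Int) ch =>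
      if PySem.Chars.isspace ch then
        if 0 ≤ st.2.2.2 then (st.1.insert st.2.1 (st.2.2.2, st.2.2.1), st.2.1 + 1, st.2.2.1 + 1, -1)
        else st
      else
        if st.2.2.2 < 0 then (st.1, st.2.1, st.2.2.1 + 1, st.2.2.1)
        else (st.1, st.2.1, st.2.2.1 + 1, st.2.2.2))
    (PySem.Dict.empty, 0, 0, -1)
  (if 0 ≤ fin.2.2.2 then fin.1.insert fin.2.1 (fin.2.2.2, fin.2.2.1) else fin.1).items

-- ===== PRECONDITION & SPEC =====
def Spec_get_offsets (text : String) (out : List (Int × Int × Int)) : Prop := out = get_offsets_alt text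
instance (text : String) (out : List (Int × Int × Int)) : Decidable (Spec_get_offsets text out) := by unfold Spec_get_offsets; infer_instance

-- ===== CLAIM (what is proved, stated in full; the proofs are below) =====
def Claim_equal_get_offsets : Prop := ∀ (text : String), Dom_get_offsets text → Spec_get_offsets text (get_offsets text)

-- ===== LEMMAS AND PROOFS =====

-- the common closed form: spans of tokens `toks`, first index `i`, first start `b`
def pvSpansC : List (List Char) → Int → Int → List (Int × Int × Int)
  | [], _, _ => []
  | t :: ts, i, b => (i, b, b + t.length) :: pvSpansC ts (i + 1) (b + t.length + 1)

def pvSpans : List String → Int → Int → List (Int × Int × Int)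
  | [], _, _ => []
  | t :: ts, i, b => (i, b, b + PySem.Str.len t) :: pvSpans ts (i + 1) (b + PySem.Str.len t + 1)

lemma pvSpans_eq (ts : List String) (i b : Int) :
    pvSpans ts i b = pvSpansC (ts.map String.toList) i b := by
  induction ts generalizing i b with
  | nil => rfl
  | cons t ts ih => simp [pvSpans, pvSpansC, ih, PySem.Str.len]

lemma pvA_loop (toks : List String) (i b e : Int) (d : PySem.Dict Int (Int × Int))
    (hk : ∀ k ∈ d.keys, k < i) :
    (((PySem.List.enumerate toks i).foldl
      (fun (st : PySem.Dict Int (Int × Int) × Int × Int) (p : Int × String) =>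
        let eidx := st.2.1 + PySem.Str.len p.2
        (st.1.insert p.1 (st.2.1, eidx), eidx + 1, eidx)) (d, b, e)).1).items
      = d.items ++ pvSpans toks i b := by
  induction toks generalizing i b e d with
  | nil => simp [pvSpans]
  | cons t ts ih =>
    rw [PySem.List.enumerate_cons, List.foldl_cons]
    have hni : d.contains i = false := by
      cases hc : d.contains i
      · rfl
      · exact absurd (hk i ((PySem.Dict.contains_iff_mem_keys d i).1 hc)) (lt_irrefl i)
    have hrec := ih (i + 1) (b + PySem.Str.len t + 1) (b + PySem.Str.len t)
        (d.insert i (b, b + PySem.Str.len t))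
        (by
          intro k hkmem
          rcases (PySem.Dict.mem_keys_insert d i k (b, b + PySem.Str.len t)).1 hkmem with h | h
          · omega
          · have := hk k h; omega)
    rw [PySem.Dict.items_insert, hni] at hrec
    simpa [pvSpans, List.append_assoc] using hrec

-- equation lemmas for split₀.go (its definition, made rewrite-friendly)
lemma pvGo_nil (cur : List Char) (acc : List (List Char)) :
    PySem.Chars.split₀.go [] cur acc
      = if cur.isEmpty then acc.reverse else (cur.reverse :: acc).reverse := by
  conv_lhs => unfold PySem.Chars.split₀.go

lemma pvGo_cons (c : Char) (cs : List Char) (cur : List Char) (acc : List (List Char)) :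
    PySem.Chars.split₀.go (c :: cs) cur acc
      = if PySem.Chars.isspace c then
          (if cur.isEmpty then PySem.Chars.split₀.go cs [] acc
           else PySem.Chars.split₀.go cs [] (cur.reverse :: acc))
        else PySem.Chars.split₀.go cs (c :: cur) acc := by
  conv_lhs => unfold PySem.Chars.split₀.go

-- split₀.go's accumulator is only prepended to the result
lemma pvGo_acc (cs : List Char) (cur : List Char) (acc : List (List Char)) :
    PySem.Chars.split₀.go cs cur acc = acc.reverse ++ PySem.Chars.split₀.go cs cur [] := by
  induction cs generalizing cur acc with
  | nil =>
    rw [pvGo_nil, pvGo_nil]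
    by_cases h : cur.isEmpty <;> simp [h]
  | cons c cs ih =>
    rw [pvGo_cons, pvGo_cons]
    by_cases hsp : PySem.Chars.isspace c
    · by_cases hcur : cur.isEmpty
      · simp only [hsp, hcur, if_true]
        exact ih [] acc
      · simp only [hsp, hcur, if_true, if_false, Bool.false_eq_true]
        rw [ih [] (cur.reverse :: acc), ih [] [cur.reverse]]
        simp
    · simp only [hsp, Bool.false_eq_true, if_false]
      exact ih (c :: cur) acc

-- B's step function, named for the proofs
def pvStep (st : PySem.Dict Int (Int × Int) × Int × Int × Int) (ch : Char) :
    PySem.Dict Int (Int × Int) × Int × Int × Int :=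
  if PySem.Chars.isspace ch then
    if 0 ≤ st.2.2.2 then (st.1.insert st.2.1 (st.2.2.2, st.2.2.1), st.2.1 + 1, st.2.2.1 + 1, -1)
    else st
  else
    if st.2.2.2 < 0 then (st.1, st.2.1, st.2.2.1 + 1, st.2.2.1)
    else (st.1, st.2.1, st.2.2.1 + 1, st.2.2.2)

-- main invariant: B's scan from any consistent state yields d.items ++ the spans of split₀.go
lemma pvB_loop (cs : List Char) (cur : List Char) (d : PySem.Dict Int (Int × Int))
    (i p start : Int)
    (hk : ∀ k ∈ d.keys, k < i) (hp : 0 ≤ p)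
    (hst : (start = -1 ∧ cur = []) ∨ (0 ≤ start ∧ p = start + cur.length ∧ cur ≠ [])) :
    (let fin := cs.foldl pvStep (d, i, p, start)
     (if 0 ≤ fin.2.2.2 then fin.1.insert fin.2.1 (fin.2.2.2, fin.2.2.1) else fin.1).items)
      = d.items ++ pvSpansC (PySem.Chars.split₀.go cs cur []) i
          (if 0 ≤ start then start else p) := by
  induction cs generalizing cur d i p start with
  | nil =>
    have hni : d.contains i = false := by
      cases hc : d.contains i
      · rfl
      · exact absurd (hk i ((PySem.Dict.contains_iff_mem_keys d i).1 hc)) (lt_irrefl i)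
    rw [pvGo_nil]
    rcases hst with ⟨h1, h2⟩ | ⟨h1, h2, h3⟩
    · subst h1; subst h2
      simp [pvSpansC]
    · have hcur : cur.isEmpty = false := by simp [h3]
      simp only [List.foldl_nil, hcur, Bool.false_eq_true, if_false]
      rw [if_pos h1, PySem.Dict.items_insert, hni]
      simp [pvSpansC, h2, if_pos h1]
  | cons c cs ih =>
    have hni : d.contains i = false := by
      cases hc : d.contains i
      · rfl
      · exact absurd (hk i ((PySem.Dict.contains_iff_mem_keys d i).1 hc)) (lt_irrefl i)
    rw [pvGo_cons]
    simp only [List.foldl_cons]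
    by_cases hsp : PySem.Chars.isspace c
    · rcases hst with ⟨h1, h2⟩ | ⟨h1, h2, h3⟩
      · subst h1; subst h2
        have hstep : pvStep (d, i, p, -1) c = (d, i, p, -1) := by
          simp [pvStep, hsp]
        rw [hstep]
        simpa [hsp] using ih [] d i p (-1) hk hp (Or.inl ⟨rfl, rfl⟩)
      · have hcur : cur.isEmpty = false := by simp [h3]
        have hstep : pvStep (d, i, p, start) c
            = (d.insert i (start, p), i + 1, p + 1, -1) := by
          simp [pvStep, hsp, h1]
        rw [hstep]
        have hk2 : ∀ k ∈ (d.insert i (start, p)).keys, k < i + 1 := by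
          intro k hkmem
          rcases (PySem.Dict.mem_keys_insert d i k (start, p)).1 hkmem with h | h
          · omega
          · have := hk k h; omega
        have hrec := ih [] (d.insert i (start, p)) (i + 1) (p + 1) (-1) hk2
          (by omega) (Or.inl ⟨rfl, rfl⟩)
        rw [hrec, PySem.Dict.items_insert, hni, pvGo_acc cs [] [cur.reverse]]
        simp only [hsp, hcur, if_true, Bool.false_eq_true, if_false,
          List.reverse_cons, List.reverse_nil, List.nil_append]
        rw [if_pos h1]
        have hnn : ¬ (0 : Int) ≤ -1 := by omega
        simp [pvSpansC, h2, List.append_assoc]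
    · rcases hst with ⟨h1, h2⟩ | ⟨h1, h2, h3⟩
      · subst h1; subst h2
        have hstep : pvStep (d, i, p, -1) c = (d, i, p + 1, p) := by
          simp [pvStep, hsp]
        rw [hstep]
        have hrec := ih [c] d i (p + 1) p hk (by omega)
          (Or.inr ⟨hp, by simp, by simp⟩)
        rw [hrec]
        have hnn : ¬ (0 : Int) ≤ -1 := by omega
        simp only [hsp, Bool.false_eq_true, if_false, if_pos hp, if_neg hnn]
      · have hstep : pvStep (d, i, p, start) c = (d, i, p + 1, start) := by
          simp [pvStep, hsp]; omega
        rw [hstep]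
        have hrec := ih (c :: cur) d i (p + 1) start hk (by omega)
          (Or.inr ⟨h1, by simp [h2]; ring, by simp⟩)
        rw [hrec]
        simp only [hsp, Bool.false_eq_true, if_false, if_pos h1]

-- ===== VERDICT (by name: the statement is the Claim_ definition above) =====
theorem get_offsets_spec : Claim_equal_get_offsets := by
  intro text _
  show get_offsets text = get_offsets_alt text
  unfold get_offsets get_offsets_alt
  rw [pvA_loop _ 0 0 0 PySem.Dict.empty (by simp [PySem.Dict.keys_empty])]
  have hB := pvB_loop text.toList [] PySem.Dict.empty 0 0 (-1)
    (by simp [PySem.Dict.keys_empty]) (le_refl 0) (Or.inl ⟨rfl, rfl⟩)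
  simp only at hB
  rw [show (fun (st : PySem.Dict Int (Int × Int) × Int × Int × Int) ch =>
      if PySem.Chars.isspace ch then
        if 0 ≤ st.2.2.2 then (st.1.insert st.2.1 (st.2.2.2, st.2.2.1), st.2.1 + 1, st.2.2.1 + 1, (-1 : Int))
        else st
      else
        if st.2.2.2 < 0 then (st.1, st.2.1, st.2.2.1 + 1, st.2.2.1)
        else (st.1, st.2.1, st.2.2.1 + 1, st.2.2.2)) = pvStep from rfl]
  rw [hB]
  have hnn : ¬ (0 : Int) ≤ -1 := by omega
  rw [pvSpans_eq, PySem.Str.split₀_map_toList]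
  simp [PySem.Dict.empty, PySem.Chars.split₀]
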